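-- pv_equiv track=rewrite | github.com/Kelsidavis/Towel | src/towel/skills/builtin/gitignore_skill.py | _generate
-- ===== SOURCE A (Python) =====
-- _TEMPLATES: dict[str, list[str]] = {
--     "python": ["__pycache__/","*.pyc","*.pyo",".venv/","venv/","dist/","build/","*.egg-info/",".pytest_cache/",".mypy_cache/",".ruff_cache/",".env","*.db",".tox/"],
--     "node": ["node_modules/","dist/","build/",".env","*.log","coverage/",".next/",".nuxt/",".cache/","*.tsbuildinfo"],
--     "rust": ["target/","Cargo.lock","**/*.rs.bk"],
--     "go": ["bin/","vendor/","*.exe","*.test","*.out"],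
--     "java": ["*.class","*.jar","*.war","target/","build/",".gradle/","out/"],
--     "swift": [".build/","Packages/","*.xcodeproj/","*.xcworkspace/","DerivedData/"],
--     "c": ["*.o","*.a","*.so","*.dylib","*.out","build/","cmake-build-*/"],
--     "general": [".DS_Store","Thumbs.db","*.swp","*.swo","*~",".idea/",".vscode/","*.log",".env"],
--     "docker": [".dockerignore","docker-compose.override.yml","*.tar"],
--     "terraform": [".terraform/","*.tfstate","*.tfstate.*","crash.log","*.tfvars"],
-- }
--
-- def _generate(languages: list[str], extras: list[str]) -> str:
--     patterns: list[str] = []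
--     for lang in languages:
--         tmpl = _TEMPLATES.get(lang.lower())
--         if tmpl:
--             patterns.append(f"# {lang}")
--             patterns.extend(tmpl)
--             patterns.append("")
--         else:
--             patterns.append(f"# Unknown: {lang}")
--     if extras:
--         patterns.append("# Custom")
--         patterns.extend(extras)
--     seen: set[str] = set()
--     deduped = []
--     for p in patterns:
--         if p not in seen or p == "" or p.startswith("#"):
--             seen.add(p)
--             deduped.append(p)
--     return "\n".join(deduped)
-- ===== SOURCE B (Python) =====
-- _TEMPLATES: dict[str, list[str]] = {
--     "python": ["__pycache__/","*.pyc","*.pyo",".venv/","venv/","dist/","build/","*.egg-info/",".pytest_cache/",".mypy_cache/",".ruff_cache/",".env","*.db",".tox/"],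
--     "node": ["node_modules/","dist/","build/",".env","*.log","coverage/",".next/",".nuxt/",".cache/","*.tsbuildinfo"],
--     "rust": ["target/","Cargo.lock","**/*.rs.bk"],
--     "go": ["bin/","vendor/","*.exe","*.test","*.out"],
--     "java": ["*.class","*.jar","*.war","target/","build/",".gradle/","out/"],
--     "swift": [".build/","Packages/","*.xcodeproj/","*.xcworkspace/","DerivedData/"],
--     "c": ["*.o","*.a","*.so","*.dylib","*.out","build/","cmake-build-*/"],
--     "general": [".DS_Store","Thumbs.db","*.swp","*.swo","*~",".idea/",".vscode/","*.log",".env"],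
--     "docker": [".dockerignore","docker-compose.override.yml","*.tar"],
--     "terraform": [".terraform/","*.tfstate","*.tfstate.*","crash.log","*.tfvars"],
-- }
--
-- def _generate(languages: list[str], extras: list[str]) -> str:
--     # single fused pass: no intermediate full pattern list, dedup done while emitting
--     seen: set[str] = set()
--     lines: list[str] = []
--
--     def emit(line: str) -> None:
--         seen.add(line)
--         lines.append(line)
--
--     for lang in languages:
--         tmpl = _TEMPLATES.get(lang.lower())
--         if not tmpl:
--             emit(f"# Unknown: {lang}")
--             continue
--         emit(f"# {lang}")
--         for p in tmpl:
--             # template lines are never empty and never start with '#',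
--             # so the keep-condition is just novelty
--             if p not in seen:
--                 emit(p)
--         emit("")
--     if extras:
--         emit("# Custom")
--         for e in extras:
--             if e == "" or e.startswith("#") or e not in seen:
--                 emit(e)
--     return "\n".join(lines)
-- ===== Notes on version B (the rewrite author's own statement) =====
-- stated objective: simpler
-- what changed: B fuses template expansion and deduplication into one pass with an emit helper, dropping the intermediate full pattern list and reducing the keep-condition for template lines to a plain novelty test (template lines are never empty or '#'-prefixed).
import Mathlib
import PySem

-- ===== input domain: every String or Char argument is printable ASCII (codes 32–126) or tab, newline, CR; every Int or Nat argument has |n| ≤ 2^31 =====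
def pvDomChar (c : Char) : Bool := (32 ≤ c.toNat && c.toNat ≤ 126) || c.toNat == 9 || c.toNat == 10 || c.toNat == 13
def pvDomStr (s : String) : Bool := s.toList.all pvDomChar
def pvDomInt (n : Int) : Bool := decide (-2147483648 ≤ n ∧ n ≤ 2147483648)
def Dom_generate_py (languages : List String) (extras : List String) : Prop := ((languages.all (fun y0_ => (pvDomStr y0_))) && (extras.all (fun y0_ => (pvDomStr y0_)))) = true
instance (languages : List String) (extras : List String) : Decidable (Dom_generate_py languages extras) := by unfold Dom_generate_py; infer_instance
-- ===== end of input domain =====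

-- B fuses template expansion and deduplication into one pass (no intermediate full pattern
-- list; template lines are kept on novelty alone since none is empty or '#'-prefixed);
-- objective: simpler single-pass decomposition, same return value.

-- ===== PORT A =====
def pvTEMPLATES : PySem.Dict String (List String) := PySem.Dict.mk [
  ("python", ["__pycache__/","*.pyc","*.pyo",".venv/","venv/","dist/","build/","*.egg-info/",".pytest_cache/",".mypy_cache/",".ruff_cache/",".env","*.db",".tox/"]),
  ("node", ["node_modules/","dist/","build/",".env","*.log","coverage/",".next/",".nuxt/",".cache/","*.tsbuildinfo"]),
  ("rust", ["target/","Cargo.lock","**/*.rs.bk"]),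
  ("go", ["bin/","vendor/","*.exe","*.test","*.out"]),
  ("java", ["*.class","*.jar","*.war","target/","build/",".gradle/","out/"]),
  ("swift", [".build/","Packages/","*.xcodeproj/","*.xcworkspace/","DerivedData/"]),
  ("c", ["*.o","*.a","*.so","*.dylib","*.out","build/","cmake-build-*/"]),
  ("general", [".DS_Store","Thumbs.db","*.swp","*.swo","*~",".idea/",".vscode/","*.log",".env"]),
  ("docker", [".dockerignore","docker-compose.override.yml","*.tar"]),
  ("terraform", [".terraform/","*.tfstate","*.tfstate.*","crash.log","*.tfvars"])]

-- the lines A appends to `patterns` for one language (header + template + blank, or unknown)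
def pvSeg (lang : String) : List String :=
  match pvTEMPLATES.get? (PySem.Str.lower lang) with
  | none => ["# Unknown: " ++ lang]
  | some t => if t = [] then ["# Unknown: " ++ lang] else ("# " ++ lang) :: (t ++ [""])

-- A's dedup-loop body: `if p not in seen or p == "" or p.startswith("#")`
def pvStepA (st : PySem.Set String × List String) (p : String) : PySem.Set String × List String :=
  if (!(PySem.Set.contains st.1 p) || p == "" || PySem.Str.startswith p "#") then
    (PySem.Set.add st.1 p, st.2 ++ [p])
  else st

def generate_py (languages : List String) (extras : List String) : String :=
  let patterns := languages.foldl (fun acc lang => acc ++ pvSeg lang) []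
  let patterns := if extras ≠ [] then patterns ++ ("# Custom" :: extras) else patterns
  let st := patterns.foldl pvStepA (PySem.Set.empty, [])
  PySem.Str.join "\n" st.2

-- ===== PORT B =====
-- emit: record the line as seen and append it to the output
def pvEmit (st : PySem.Set String × List String) (line : String) : PySem.Set String × List String :=
  (PySem.Set.add st.1 line, st.2 ++ [line])

def generate_py_alt (languages : List String) (extras : List String) : String :=
  let st := languages.foldl (fun st lang =>
    match pvTEMPLATES.get? (PySem.Str.lower lang) with
    | none => pvEmit st ("# Unknown: " ++ lang)
    | some tmpl =>
      if tmpl = [] then pvEmit st ("# Unknown: " ++ lang)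
      else
        let st := pvEmit st ("# " ++ lang)
        let st := tmpl.foldl (fun st p => if PySem.Set.contains st.1 p then st else pvEmit st p) st
        pvEmit st "") (PySem.Set.empty, [])
  let st := if extras ≠ [] then
      let st := pvEmit st "# Custom"
      extras.foldl (fun st e =>
        if (e == "" || PySem.Str.startswith e "#" || !(PySem.Set.contains st.1 e)) then pvEmit st e else st) st
    else st
  PySem.Str.join "\n" st.2

-- ===== PRECONDITION & SPEC =====
def Spec_generate_py (languages : List String) (extras : List String) (out : String) : Prop := out = generate_py_alt languages extras
instance (languages : List String) (extras : List String) (out : String) : Decidable (Spec_generate_py languages extras out) := by unfold Spec_generate_py; infer_instance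

-- ===== CLAIM (what is proved, stated in full; the proofs are below) =====
def Claim_equal_generate_py : Prop := ∀ (languages : List String) (extras : List String), Dom_generate_py languages extras → Spec_generate_py languages extras (generate_py languages extras)

-- ===== LEMMAS AND PROOFS =====

theorem pv_build_eq_flatMap (langs : List String) (acc : List String) :
    langs.foldl (fun acc lang => acc ++ pvSeg lang) acc = acc ++ langs.flatMap pvSeg := by
  induction langs generalizing acc with
  | nil => simp
  | cons l ls ih => simp [List.foldl_cons, ih, List.flatMap_cons]

theorem pv_sw_append (s r : String) (h : PySem.Str.startswith s "#" = true) :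
    PySem.Str.startswith (s ++ r) "#" = true := by
  rw [PySem.Str.startswith_eq, PySem.Chars.startswith_iff] at h ⊢
  rw [String.toList_append]
  exact h.trans (List.prefix_append _ _)

theorem pv_tmpl_ok (s : String) (t : List String) (h : pvTEMPLATES.get? s = some t) :
    ∀ p ∈ t, (p == "" || PySem.Str.startswith p "#") = false := by
  have ht : t.all (fun p => !(p == "" || PySem.Str.startswith p "#")) = true := by
    unfold pvTEMPLATES at h
    simp only [PySem.Dict.get?_mk_cons] at h
    split_ifs at h <;> first
      | (cases h; decide)
      | (exact absurd h (by simp [PySem.Dict.get?]))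
  intro p hp
  have := List.all_eq_true.mp ht p hp
  simpa using this

theorem pv_stepA_keep (st : PySem.Set String × List String) (p : String)
    (h : (p == "" || PySem.Str.startswith p "#") = true) : pvStepA st p = pvEmit st p := by
  unfold pvStepA pvEmit
  rcases Bool.or_eq_true_iff.mp h with h1 | h1 <;> rw [h1] <;> simp

theorem pv_seg_fold (lang : String) (st : PySem.Set String × List String) :
    (pvSeg lang).foldl pvStepA st =
      (match pvTEMPLATES.get? (PySem.Str.lower lang) with
       | none => pvEmit st ("# Unknown: " ++ lang)
       | some tmpl =>
         if tmpl = [] then pvEmit st ("# Unknown: " ++ lang)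
         else
           let st := pvEmit st ("# " ++ lang)
           let st := tmpl.foldl (fun st p => if PySem.Set.contains st.1 p then st else pvEmit st p) st
           pvEmit st "") := by
  unfold pvSeg
  cases hg : pvTEMPLATES.get? (PySem.Str.lower lang) with
  | none =>
    simp only [List.foldl_cons, List.foldl_nil]
    exact pv_stepA_keep _ _ (by rw [pv_sw_append "# Unknown: " lang (by decide)]; exact Bool.or_true _)
  | some t =>
    by_cases ht : t = []
    · simp only [ht, if_true, List.foldl_cons, List.foldl_nil]
      exact pv_stepA_keep _ _ (by rw [pv_sw_append "# Unknown: " lang (by decide)]; exact Bool.or_true _)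
    · simp only [ht, if_false, List.foldl_cons, List.foldl_append, List.foldl_nil]
      have hHdr : pvStepA st ("# " ++ lang) = pvEmit st ("# " ++ lang) :=
        pv_stepA_keep _ _ (by rw [pv_sw_append "# " lang (by decide)]; exact Bool.or_true _)
      rw [hHdr]
      have hcongr : List.foldl pvStepA (pvEmit st ("# " ++ lang)) t
          = List.foldl (fun st p => if PySem.Set.contains st.1 p then st else pvEmit st p)
              (pvEmit st ("# " ++ lang)) t := by
        apply PySem.List.foldl_congr_mem
        intro acc x hx
        have hok := pv_tmpl_ok _ _ hg x hx
        rcases Bool.or_eq_false_iff.mp hok with ⟨h1, h2⟩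
        unfold pvStepA pvEmit
        rw [h1, h2, Bool.or_false, Bool.or_false]
        cases PySem.Set.contains acc.1 x <;> simp
      rw [hcongr]
      exact pv_stepA_keep _ "" (by decide)

theorem pv_lang_fold (langs : List String) (st : PySem.Set String × List String) :
    (langs.flatMap pvSeg).foldl pvStepA st =
      langs.foldl (fun st lang =>
        match pvTEMPLATES.get? (PySem.Str.lower lang) with
        | none => pvEmit st ("# Unknown: " ++ lang)
        | some tmpl =>
          if tmpl = [] then pvEmit st ("# Unknown: " ++ lang)
          else
            let st := pvEmit st ("# " ++ lang)
            let st := tmpl.foldl (fun st p => if PySem.Set.contains st.1 p then st else pvEmit st p) st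
            pvEmit st "") st := by
  induction langs generalizing st with
  | nil => rfl
  | cons l ls ih =>
    simp only [List.flatMap_cons, List.foldl_append, List.foldl_cons]
    rw [pv_seg_fold]
    exact ih _

theorem pv_extras_fold (extras : List String) (st : PySem.Set String × List String) :
    extras.foldl pvStepA st =
      extras.foldl (fun st e =>
        if (e == "" || PySem.Str.startswith e "#" || !(PySem.Set.contains st.1 e)) then pvEmit st e else st) st := by
  apply PySem.List.foldl_congr_mem
  intro acc x _
  unfold pvStepA pvEmit
  have : (!(PySem.Set.contains acc.1 x) || x == "" || PySem.Str.startswith x "#") =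
      (x == "" || PySem.Str.startswith x "#" || !(PySem.Set.contains acc.1 x)) := by
    cases PySem.Set.contains acc.1 x <;> cases x == "" <;> cases PySem.Str.startswith x "#" <;> rfl
  rw [this]

-- ===== VERDICT (by name: the statement is the Claim_ definition above) =====
theorem generate_py_spec : Claim_equal_generate_py := by
  intro languages extras _
  unfold Spec_generate_py generate_py generate_py_alt
  rw [pv_build_eq_flatMap]
  simp only [List.nil_append]
  by_cases hx : extras = []
  · simp only [hx, ne_eq, not_true_eq_false, if_false, pv_lang_fold]
  · simp only [ne_eq, hx, not_false_eq_true, if_true, List.foldl_append, List.foldl_cons,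
      pv_lang_fold]
    rw [pv_stepA_keep _ _ (by decide), pv_extras_fold]
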